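-- pv_equiv track=rewrite | github.com/OvidiuGrec/Darwin-Project | helper.py | to_classes
-- ===== SOURCE A (Python) =====
-- def to_classes(y, binary=False):
-- 	for i in range(len(y)):
-- 		bdi = y[i]
--
-- 		if binary:
-- 			if bdi < 20:
-- 				y[i] = 0
-- 			else:
-- 				y[i] = 1
-- 		else:
-- 			if bdi <= 10:
-- 				y[i] = 0  # normal
-- 			elif 10 < bdi <= 16:
-- 				y[i] = 1  # mild mood
-- 			elif 16 < bdi <= 20:
-- 				y[i] = 2  # (borderline) clinical depression
-- 			elif 20 < bdi <= 30:
-- 				y[i] = 3  # moderate depression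
-- 			elif 30 < bdi <= 40:
-- 				y[i] = 4  # sever depression
-- 			elif bdi > 40:
-- 				y[i] = 5  # extreme
-- 	return y
-- ===== SOURCE B (Python) =====
-- def to_classes(y, binary=False):
--     # Transposed loops: instead of classifying each element with a branch chain,
--     # make one positionwise pass per cutoff, incrementing a class counter for
--     # every score strictly above that cutoff; finally write the counters back
--     # into y (same in-place mutation as A).  For integer scores the binary rule
--     # "bdi < 20 -> 0 else 1" is exactly one strict cutoff at 19.
--     cuts = [19] if binary else [10, 16, 20, 30, 40]
--     cls = [0] * len(y)
--     for t in cuts: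
--         for i, v in enumerate(y):
--             if v > t:
--                 cls[i] += 1
--     y[:] = cls
--     return y
-- ===== Notes on version B (the rewrite author's own statement) =====
-- stated objective: alternative
-- what changed: Loop transposition: instead of one pass over elements with a 6-way if/elif chain, B keeps a list of class counters and makes one positionwise pass per cutoff, incrementing the counter of every score strictly above that cutoff, then writes the counters back into y (same in-place mutation as A).
import Mathlib
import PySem

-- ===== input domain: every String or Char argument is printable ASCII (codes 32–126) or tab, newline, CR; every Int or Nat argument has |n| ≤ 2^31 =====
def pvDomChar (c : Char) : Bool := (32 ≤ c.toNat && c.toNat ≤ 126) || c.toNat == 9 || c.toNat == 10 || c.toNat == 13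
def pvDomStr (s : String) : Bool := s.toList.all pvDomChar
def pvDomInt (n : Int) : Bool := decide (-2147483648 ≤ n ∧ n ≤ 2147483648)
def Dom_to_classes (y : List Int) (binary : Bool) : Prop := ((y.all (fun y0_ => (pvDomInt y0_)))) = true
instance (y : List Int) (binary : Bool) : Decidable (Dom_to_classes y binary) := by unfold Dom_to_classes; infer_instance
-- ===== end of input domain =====

-- ===== PORT A =====
-- One honest line: B transposes the loops — one positionwise pass per cutoff
-- incrementing class counters, instead of A's per-element if/elif chain
-- (alternative decomposition, same cost); B mutates y in place like A, and the
-- equivalence proved here is about the return value.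
def to_classes (y : List Int) (binary : Bool) : List Int :=
  (PySem.List.pyRange 0 (y.length : Int) 1).foldl (fun acc i =>
    match PySem.List.pyGet? acc i with
    | none => acc  -- unreachable: i ∈ range(len(y)) and writes preserve length
    | some bdi =>
      if binary then
        if bdi < 20 then acc.set i.toNat 0
        else acc.set i.toNat 1
      else
        if bdi ≤ 10 then acc.set i.toNat 0
        else if 10 < bdi ∧ bdi ≤ 16 then acc.set i.toNat 1
        else if 16 < bdi ∧ bdi ≤ 20 then acc.set i.toNat 2
        else if 20 < bdi ∧ bdi ≤ 30 then acc.set i.toNat 3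
        else if 30 < bdi ∧ bdi ≤ 40 then acc.set i.toNat 4
        else if bdi > 40 then acc.set i.toNat 5
        else acc) y

-- ===== PORT B =====
-- Source B's inner pass "for i, v in enumerate(y): if v > t: cls[i] += 1" is a
-- positionwise update of cls against y, ported as zipWith over the two lists.
def to_classes_alt (y : List Int) (binary : Bool) : List Int :=
  let cuts : List Int := if binary then [19] else [10, 16, 20, 30, 40]
  cuts.foldl (fun cls t => cls.zipWith (fun c v => if v > t then c + 1 else c) y)
    (y.map (fun _ => (0 : Int)))

-- ===== PRECONDITION & SPEC =====
def Spec_to_classes (y : List Int) (binary : Bool) (out : List Int) : Prop := out = to_classes_alt y binary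
instance (y : List Int) (binary : Bool) (out : List Int) : Decidable (Spec_to_classes y binary out) := by unfold Spec_to_classes; infer_instance

-- ===== CLAIM (what is proved, stated in full; the proofs are below) =====
def Claim_equal_to_classes : Prop := ∀ (y : List Int) (binary : Bool), Dom_to_classes y binary → Spec_to_classes y binary (to_classes y binary)

-- ===== LEMMAS AND PROOFS =====

-- The value A's branch chain assigns to one element.
def pvClassOf (binary : Bool) (bdi : Int) : Int :=
  if binary then (if bdi < 20 then 0 else 1)
  else if bdi ≤ 10 then 0
  else if bdi ≤ 16 then 1
  else if bdi ≤ 20 then 2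
  else if bdi ≤ 30 then 3
  else if bdi ≤ 40 then 4
  else 5

-- A's loop body equals "set index i to pvClassOf binary of the element read there".
lemma pvStep_eq (binary : Bool) (acc : List Int) (i : Int) (b : Int)
    (h : PySem.List.pyGet? acc i = some b) :
    (match PySem.List.pyGet? acc i with
      | none => acc
      | some bdi =>
        if binary then
          if bdi < 20 then acc.set i.toNat 0
          else acc.set i.toNat 1
        else
          if bdi ≤ 10 then acc.set i.toNat 0
          else if 10 < bdi ∧ bdi ≤ 16 then acc.set i.toNat 1
          else if 16 < bdi ∧ bdi ≤ 20 then acc.set i.toNat 2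
          else if 20 < bdi ∧ bdi ≤ 30 then acc.set i.toNat 3
          else if 30 < bdi ∧ bdi ≤ 40 then acc.set i.toNat 4
          else if bdi > 40 then acc.set i.toNat 5
          else acc)
    = acc.set i.toNat (pvClassOf binary b) := by
  simp only [h, pvClassOf]
  cases binary <;> split_ifs <;> first | rfl | omega

-- A's read-modify-write loop over range(len) computes the map of pvClassOf.
lemma pvLoop_eq_map (binary : Bool) :
    ∀ (post pre : List Int),
    (PySem.List.pyRange (pre.length : Int) ((pre.length : Int) + (post.length : Int)) 1).foldl
      (fun (acc : List Int) (i : Int) =>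
        match PySem.List.pyGet? acc i with
        | none => acc
        | some bdi =>
          if binary then
            if bdi < 20 then acc.set i.toNat 0
            else acc.set i.toNat 1
          else
            if bdi ≤ 10 then acc.set i.toNat 0
            else if 10 < bdi ∧ bdi ≤ 16 then acc.set i.toNat 1
            else if 16 < bdi ∧ bdi ≤ 20 then acc.set i.toNat 2
            else if 20 < bdi ∧ bdi ≤ 30 then acc.set i.toNat 3
            else if 30 < bdi ∧ bdi ≤ 40 then acc.set i.toNat 4
            else if bdi > 40 then acc.set i.toNat 5
            else acc) (pre ++ post)
    = pre ++ post.map (pvClassOf binary) := by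
  intro post
  induction post with
  | nil =>
      intro pre
      rw [PySem.List.pyRange_one_eq_nil (by simp)]
      simp
  | cons b rest ih =>
      intro pre
      rw [PySem.List.pyRange_one_cons (by push_cast [List.length_cons]; omega)]
      rw [List.foldl_cons]
      rw [show (match PySem.List.pyGet? (pre ++ b :: rest) ((pre.length : Int)) with
          | none => pre ++ b :: rest
          | some bdi =>
            if binary then
              if bdi < 20 then (pre ++ b :: rest).set ((pre.length : Int)).toNat 0
              else (pre ++ b :: rest).set ((pre.length : Int)).toNat 1
            else
              if bdi ≤ 10 then (pre ++ b :: rest).set ((pre.length : Int)).toNat 0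
              else if 10 < bdi ∧ bdi ≤ 16 then (pre ++ b :: rest).set ((pre.length : Int)).toNat 1
              else if 16 < bdi ∧ bdi ≤ 20 then (pre ++ b :: rest).set ((pre.length : Int)).toNat 2
              else if 20 < bdi ∧ bdi ≤ 30 then (pre ++ b :: rest).set ((pre.length : Int)).toNat 3
              else if 30 < bdi ∧ bdi ≤ 40 then (pre ++ b :: rest).set ((pre.length : Int)).toNat 4
              else if bdi > 40 then (pre ++ b :: rest).set ((pre.length : Int)).toNat 5
              else pre ++ b :: rest)
          = (pre ++ b :: rest).set ((pre.length : Int)).toNat (pvClassOf binary b)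
        from pvStep_eq binary (pre ++ b :: rest) (pre.length : Int) b
          (PySem.List.pyGet?_append_length pre rest b)]
      have hset : (pre ++ b :: rest).set ((pre.length : Int)).toNat (pvClassOf binary b)
          = (pre ++ [pvClassOf binary b]) ++ rest := by
        simp
      rw [hset]
      have hlen : ((pre ++ [pvClassOf binary b]).length : Int) = (pre.length : Int) + 1 := by
        simp
      have := ih (pre ++ [pvClassOf binary b])
      rw [hlen] at this
      have harg : (pre.length : Int) + 1 + (rest.length : Int)
          = (pre.length : Int) + ((b :: rest).length : Int) := by
        push_cast [List.length_cons]; omega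
      rw [harg] at this
      rw [this]
      simp

-- One cutoff pass rewrites cls = y.map g into y.map (g bumped at values above t).
lemma pvPass_eq_map (t : Int) (g : Int → Int) :
    ∀ (y : List Int),
    (y.map g).zipWith (fun c v => if v > t then c + 1 else c) y
      = y.map (fun v => if v > t then g v + 1 else g v) := by
  intro y
  induction y with
  | nil => rfl
  | cons a rest ih => simp [List.zipWith, ih]

-- Folding the cutoff passes counts, per element, the cutoffs strictly below it.
lemma pvFold_counts (cuts : List Int) :
    ∀ (g : Int → Int) (y : List Int),
    cuts.foldl (fun cls t => cls.zipWith (fun c v => if v > t then c + 1 else c) y)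
      (y.map g)
    = y.map (fun v => g v + ((cuts.countP (fun t => v > t) : Nat) : Int)) := by
  induction cuts with
  | nil => intro g y; simp
  | cons t rest ih =>
      intro g y
      rw [List.foldl_cons, pvPass_eq_map t g y,
        ih (fun v => if v > t then g v + 1 else g v) y]
      refine List.map_congr_left (fun v _ => ?_)
      by_cases h : v > t <;> simp [List.countP_cons, h] <;> omega

-- Pointwise: the number of cutoffs strictly below v is A's class of v.
lemma pvCount_eq_class (binary : Bool) (v : Int) :
    (((if binary then ([19] : List Int) else [10, 16, 20, 30, 40]).countP
        (fun t => v > t) : Nat) : Int) = pvClassOf binary v := by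
  cases binary
  · simp only [Bool.false_eq_true, if_false]
    rw [List.countP_cons, List.countP_cons, List.countP_cons, List.countP_cons,
      List.countP_cons, List.countP_nil]
    simp only [pvClassOf, Bool.false_eq_true, if_false, decide_eq_true_eq, gt_iff_lt]
    split_ifs <;> push_cast <;> omega
  · simp only [if_true]
    rw [List.countP_cons, List.countP_nil]
    simp only [pvClassOf, if_true, decide_eq_true_eq, gt_iff_lt]
    split_ifs <;> push_cast <;> omega

-- ===== VERDICT (by name: the statement is the Claim_ definition above) =====
theorem to_classes_spec : Claim_equal_to_classes := by
  intro y binary _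
  unfold Spec_to_classes to_classes to_classes_alt
  have h := pvLoop_eq_map binary y []
  simp only [List.length_nil, Nat.cast_zero, List.nil_append, zero_add] at h
  rw [h, pvFold_counts]
  exact List.map_congr_left (fun v _ => by rw [zero_add, pvCount_eq_class])
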